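-- pv_equiv track=rewrite | github.com/ella-c-rasmussen/wayback-scraper | scraper_body/scraper.py | create_folder_name
-- ===== SOURCE A (Python) =====
-- def create_folder_name(URL):
--     name = URL
--     if "http" in name:
--         name = name.split('/')[2]
--
--     forbidden_chars = ['<', '>', ':', '"', "'", '/', '\\', '|', '?', '*']
--     for char in forbidden_chars:
--         name = name.replace(char, '-')
--     return name
-- ===== SOURCE B (Python) =====
-- def create_folder_name(URL):
--     name = URL
--     if "http" in name:
--         name = name.split('/')[2]
--     forbidden = {'<', '>', ':', '"', "'", '/', '\\', '|', '?', '*'}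
--     return ''.join('-' if c in forbidden else c for c in name)
-- ===== Notes on version B (the rewrite author's own statement) =====
-- stated objective: idiomatic
-- what changed: Replaces the nine sequential str.replace passes (one full scan of the string per forbidden character) with a single pass over the characters of name, joining a dash or the character according to membership in a set of forbidden characters.
import Mathlib
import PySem

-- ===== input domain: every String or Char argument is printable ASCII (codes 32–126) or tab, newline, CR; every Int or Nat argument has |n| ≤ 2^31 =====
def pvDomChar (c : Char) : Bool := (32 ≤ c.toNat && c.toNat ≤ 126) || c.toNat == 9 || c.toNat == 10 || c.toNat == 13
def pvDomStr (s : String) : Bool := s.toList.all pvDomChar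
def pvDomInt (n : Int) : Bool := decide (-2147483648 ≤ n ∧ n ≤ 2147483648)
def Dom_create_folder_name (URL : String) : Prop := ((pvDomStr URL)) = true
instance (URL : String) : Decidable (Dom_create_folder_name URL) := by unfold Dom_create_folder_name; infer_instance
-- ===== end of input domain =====

-- B replaces A's nine sequential str.replace passes by one membership-driven pass over the
-- characters of name (idiomatic, same result).

-- ===== PORT A =====
def create_folder_name (URL : String) : String :=
  let name := URL
  let name :=
    if PySem.Str.isIn "http" name then
      -- index 2 of splitting name on the slash separator; Pre_ guarantees it exists (else IndexError)
      (PySem.List.pyGet? ((PySem.Str.split? name "/").getD []) 2).getD ""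
    else name
  -- for char in forbidden_chars: name = name.replace(char, '-')
  (["<", ">", ":", "\"", "'", "/", "\\", "|", "?", "*"] : List String).foldl
    (fun n c => PySem.Str.replace n c "-") name

-- ===== PORT B =====
def create_folder_name_alt (URL : String) : String :=
  let name := URL
  let name :=
    if PySem.Str.isIn "http" name then
      (PySem.List.pyGet? ((PySem.Str.split? name "/").getD []) 2).getD ""
    else name
  let forbidden : PySem.Set Char :=
    PySem.Set.ofList ['<', '>', ':', '"', '\'', '/', '\\', '|', '?', '*']
  -- ''.join('-' if c in forbidden else c for c in name)
  String.ofList (name.toList.map (fun c => if forbidden.contains c then '-' else c))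

-- ===== PRECONDITION & SPEC =====
-- Pre_ excludes exactly the inputs where name.split('/')[2] raises IndexError
-- (the substring http occurs in URL but URL has fewer than two slash separators); B raises there too.
def Pre_create_folder_name (URL : String) : Prop :=
  PySem.Str.isIn "http" URL = true → 3 ≤ ((PySem.Str.split? URL "/").getD []).length
instance (URL : String) : Decidable (Pre_create_folder_name URL) := by
  unfold Pre_create_folder_name; infer_instance
def pvWitness_create_folder_name : String := "http://example.com/my page?q=1"

def Spec_create_folder_name (URL : String) (out : String) : Prop := out = create_folder_name_alt URL
instance (URL : String) (out : String) : Decidable (Spec_create_folder_name URL out) := by unfold Spec_create_folder_name; infer_instance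

-- ===== CLAIM (what is proved, stated in full; the proofs are below) =====
def Claim_equal_create_folder_name : Prop := ∀ (URL : String), Dom_create_folder_name URL → Pre_create_folder_name URL → Spec_create_folder_name URL (create_folder_name URL)

-- ===== LEMMAS AND PROOFS =====

-- replace.go with a single-character pattern is pointwise substitution (fuel ≥ length)
theorem replace_go_single (c d : Char) :
    ∀ (l : List Char) (fuel : Nat) (acc : List Char), l.length ≤ fuel →
      PySem.Chars.replace.go [c] [d] fuel l acc =
        acc.reverse ++ l.map (fun x => if x = c then d else x) := by
  intro l
  induction l with
  | nil => intro fuel acc _; cases fuel <;> simp [PySem.Chars.replace.go]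
  | cons h t ih =>
    intro fuel acc hf
    cases fuel with
    | zero => simp at hf
    | succ n =>
      simp only [PySem.Chars.replace.go]
      by_cases hc : h = c
      · subst hc
        have hp : List.isPrefixOf [h] (h :: t) = true := by
          simp [List.isPrefixOf]
        rw [if_pos hp]
        simp only [List.length_cons] at hf
        simp only [List.length_cons, List.length_nil, List.drop_succ_cons, List.drop_zero]
        rw [ih n _ (by omega)]
        simp [List.map_cons]
      · have hp : List.isPrefixOf [c] (h :: t) = false := by
          simp [List.isPrefixOf]; exact fun e => (hc e.symm).elim
        rw [if_neg (by simp [hp])]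
        simp only [List.length_cons] at hf
        rw [ih n _ (by omega)]
        simp [hc]

theorem chars_replace_single (c d : Char) (cs : List Char) :
    PySem.Chars.replace cs [c] [d] = cs.map (fun x => if x = c then d else x) := by
  unfold PySem.Chars.replace
  simp only [List.isEmpty_cons]
  rw [if_neg (by simp)]
  exact replace_go_single c d cs cs.length [] le_rfl

-- folding single-char substitutions into '-' is one pass with a membership test
theorem foldl_subst (L : List Char) :
    ∀ (cs : List Char),
      L.foldl (fun cs c => cs.map (fun x => if x = c then '-' else x)) cs =
        cs.map (fun x => if x ∈ L then '-' else x) := by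
  induction L with
  | nil => intro cs; simp
  | cons a L ih =>
    intro cs
    simp only [List.foldl_cons]
    rw [ih, List.map_map]
    apply List.map_congr_left
    intro x _
    by_cases hx : x = a <;> simp [hx, Function.comp]

-- the nine replace passes of A equal B's single membership pass, for any name
theorem string_fold_eq (name : String) :
    (["<", ">", ":", "\"", "'", "/", "\\", "|", "?", "*"] : List String).foldl
        (fun n c => PySem.Str.replace n c "-") name =
      String.ofList (name.toList.map
        (fun c => if (PySem.Set.ofList ['<', '>', ':', '"', '\'', '/', '\\', '|', '?', '*']).contains c
                  then '-' else c)) := by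
  apply String.toList_inj.mp
  have hfold := foldl_subst ['<', '>', ':', '"', '\'', '/', '\\', '|', '?', '*'] name.toList
  simp only [List.foldl_cons, List.foldl_nil] at hfold
  simp only [List.foldl_cons, List.foldl_nil, PySem.Str.toList_replace, String.toList_ofList,
    show ("<" : String).toList = ['<'] from rfl,
    show (">" : String).toList = ['>'] from rfl,
    show (":" : String).toList = [':'] from rfl,
    show ("\"" : String).toList = ['"'] from rfl,
    show ("'" : String).toList = ['\''] from rfl,
    show ("/" : String).toList = ['/'] from rfl,
    show ("\\" : String).toList = ['\\'] from rfl,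
    show ("|" : String).toList = ['|'] from rfl,
    show ("?" : String).toList = ['?'] from rfl,
    show ("*" : String).toList = ['*'] from rfl,
    show ("-" : String).toList = ['-'] from rfl,
    chars_replace_single]
  rw [hfold]
  apply List.map_congr_left
  intro x _
  simp [PySem.Set.contains_eq_listContains, List.contains_eq_mem,
    show PySem.Set.ofList ['<', '>', ':', '"', '\'', '/', '\\', '|', '?', '*']
      = ['<', '>', ':', '"', '\'', '/', '\\', '|', '?', '*'] from by decide]

-- ===== VERDICT (by name: the statement is the Claim_ definition above) =====
theorem create_folder_name_spec : Claim_equal_create_folder_name := by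
  intro URL _ _
  unfold Spec_create_folder_name create_folder_name create_folder_name_alt
  exact string_fold_eq _
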